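-- pv_equiv track=rewrite | github.com/dzhamon/Python_project | analiz_GUI_tmp_v5.py | group_build
-- ===== SOURCE A (Python) =====
-- def group_build(grouping_names, inn_group):
--     out_group = []
--     for m in range(len(grouping_names)):
--         out_group.append('')
--     i = 0
--     for grouping_name in grouping_names:
--         out_group[i] = []
--         for sp_num in range(len(inn_group)):
--             for value in inn_group[sp_num].values():
--                 if grouping_name != value:
--                     continue
--                 else:
--                     out_group[i].append(inn_group[sp_num])
--         i = i + 1
--     return out_group
-- ===== SOURCE B (Python) =====
-- def group_build(grouping_names, inn_group):
--     pos = {}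
--     for i, g in enumerate(grouping_names):
--         pos.setdefault(g, []).append(i)
--     out = [[] for _ in grouping_names]
--     for d in inn_group:
--         for v in d.values():
--             for i in pos.get(v, []):
--                 out[i].append(d)
--     return out
-- ===== Notes on version B (the rewrite author's own statement) =====
-- stated objective: faster
-- what changed: B inverts the loop nesting: it precomputes a name->output-positions map from grouping_names, allocates all cells up front, and fills them in a single pass over inn_group (appending each dict to the cells of every name its values match), instead of A's rescan of all dict values once per grouping name.
import Mathlib
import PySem

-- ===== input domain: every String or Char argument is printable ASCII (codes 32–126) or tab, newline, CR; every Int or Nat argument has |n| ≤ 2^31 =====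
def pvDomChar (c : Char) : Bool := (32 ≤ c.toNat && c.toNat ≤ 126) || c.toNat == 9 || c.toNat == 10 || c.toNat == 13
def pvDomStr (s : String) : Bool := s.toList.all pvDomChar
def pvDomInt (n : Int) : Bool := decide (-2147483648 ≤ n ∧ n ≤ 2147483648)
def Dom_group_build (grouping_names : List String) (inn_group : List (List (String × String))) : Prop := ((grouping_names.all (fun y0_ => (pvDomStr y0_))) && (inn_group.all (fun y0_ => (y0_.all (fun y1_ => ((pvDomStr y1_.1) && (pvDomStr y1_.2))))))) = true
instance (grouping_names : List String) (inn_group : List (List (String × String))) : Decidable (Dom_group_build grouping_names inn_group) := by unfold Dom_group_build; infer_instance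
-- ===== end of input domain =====

-- B inverts A's traversal: instead of rescanning every dict's values once per grouping name, it
-- maps each name to its output positions once, then makes a single pass over the dicts, pushing
-- each dict into the cells of the names its values hit (measurably faster).

-- ===== PORT A =====
-- A's initial loop fills out_group with '' placeholders which are all overwritten before being
-- read (i runs over the same indices), so the port builds the final list position by position;
-- 'for sp_num in range(len(inn_group))' only ever reads inn_group[sp_num], ported as the
-- structural fold over inn_group; a dict's .values() is (PySem.Dict.ofList d).values.
def group_build (grouping_names : List String) (inn_group : List (List (String × String))) : List (List (List (String × String))) :=
  grouping_names.foldl (fun out_group grouping_name =>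
    out_group ++ [inn_group.foldl (fun cell d =>
      (PySem.Dict.ofList d).values.foldl (fun cell v =>
        if grouping_name ≠ v then cell else cell ++ [d]) cell) []]) []

-- ===== PORT B =====
-- pos.setdefault(g, []).append(i)  ==  pos[g] = pos.get(g, []) + [i]  ==  Dict.modify g [] (· ++ [i]);
-- every index stored in pos comes from enumerate, hence is ≥ 0, so Python's out[i].append(d) is
-- exactly List.modify i.toNat (· ++ [d]) on the inputs it is ever run on.
def group_build_alt (grouping_names : List String) (inn_group : List (List (String × String))) : List (List (List (String × String))) :=
  let pos : PySem.Dict String (List Int) :=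
    (PySem.List.enumerate grouping_names 0).foldl
      (fun p q => p.modify q.2 [] (· ++ [q.1])) PySem.Dict.empty
  let out0 : List (List (List (String × String))) := grouping_names.map (fun _ => [])
  inn_group.foldl (fun out d =>
    (PySem.Dict.ofList d).values.foldl (fun out v =>
      (pos.getD v []).foldl (fun out i => out.modify i.toNat (· ++ [d])) out) out) out0

-- ===== PRECONDITION & SPEC =====
def Spec_group_build (grouping_names : List String) (inn_group : List (List (String × String))) (out : List (List (List (String × String)))) : Prop := out = group_build_alt grouping_names inn_group
instance (grouping_names : List String) (inn_group : List (List (String × String))) (out : List (List (List (String × String)))) : Decidable (Spec_group_build grouping_names inn_group out) := by unfold Spec_group_build; infer_instance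

-- ===== CLAIM (what is proved, stated in full; the proofs are below) =====
def Claim_equal_group_build : Prop := ∀ (grouping_names : List String) (inn_group : List (List (String × String))), Dom_group_build grouping_names inn_group → Spec_group_build grouping_names inn_group (group_build grouping_names inn_group)

-- ===== LEMMAS AND PROOFS =====

-- the canonical value both sides compute for one grouping name
def pvCell (g : String) (inn_group : List (List (String × String))) : List (List (String × String)) :=
  inn_group.flatMap (fun d => List.replicate ((PySem.Dict.ofList d).values.filter (fun v => v == g)).length d)

-- B's name → positions dictionary, named for the lemmas
def pvPos (gs : List String) : PySem.Dict String (List Int) :=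
  (PySem.List.enumerate gs 0).foldl (fun p q => p.modify q.2 [] (· ++ [q.1])) PySem.Dict.empty

-- ========== A side ==========

theorem pvA_inner (g : String) (d : List (String × String)) (vals : List String)
    (acc : List (List (String × String))) :
    vals.foldl (fun cell v => if g ≠ v then cell else cell ++ [d]) acc
      = acc ++ List.replicate ((vals.filter (fun v => v == g)).length) d := by
  induction vals generalizing acc with
  | nil => simp
  | cons v vs ih =>
    simp only [List.foldl_cons, List.filter_cons]
    by_cases h : g = v
    · subst h
      rw [if_neg (by simp), ih]
      simp [List.replicate_succ, List.append_assoc]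
    · rw [if_pos h, ih]
      have h' : (v == g) = false := by simp [Ne.symm h]
      simp [h']

theorem pvA_mid (g : String) (inn_group : List (List (String × String)))
    (acc : List (List (String × String))) :
    inn_group.foldl (fun cell d =>
        (PySem.Dict.ofList d).values.foldl (fun cell v => if g ≠ v then cell else cell ++ [d]) cell) acc
      = acc ++ pvCell g inn_group := by
  induction inn_group generalizing acc with
  | nil => simp [pvCell]
  | cons d ds ih =>
    simp only [List.foldl_cons]
    rw [pvA_inner, ih]
    simp [pvCell, List.append_assoc]

theorem pvA_outer (inn_group : List (List (String × String))) (gs : List String)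
    (acc : List (List (List (String × String)))) :
    gs.foldl (fun out_group g =>
        out_group ++ [inn_group.foldl (fun cell d =>
          (PySem.Dict.ofList d).values.foldl (fun cell v => if g ≠ v then cell else cell ++ [d]) cell) []]) acc
      = acc ++ gs.map (fun g => pvCell g inn_group) := by
  induction gs generalizing acc with
  | nil => simp
  | cons g gs ih =>
    simp only [List.foldl_cons, List.map_cons]
    rw [ih, pvA_mid g inn_group []]
    simp

-- ========== B side ==========

theorem pvPos_getD (gs : List String) (v : String) :
    (pvPos gs).getD v [] = ((PySem.List.enumerate gs 0).filter (fun q => q.2 == v)).map (·.1) := by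
  have h := PySem.Dict.getD_foldl_modify_append
    (l := (PySem.List.enumerate gs 0).map (fun q => (q.2, q.1)))
    (d := (PySem.Dict.empty : PySem.Dict String (List Int))) (c := v)
  simp only [List.foldl_map, List.filter_map, List.map_map] at h
  simpa [pvPos, Function.comp_def] using h

theorem pvPos_mem (gs : List String) (v : String) (i : Nat) :
    ((i : Int) ∈ (pvPos gs).getD v []) ↔ ∃ h : i < gs.length, gs[i] = v := by
  rw [pvPos_getD]
  simp only [List.mem_map, List.mem_filter, PySem.List.mem_enumerate_iff]
  constructor
  · rintro ⟨q, ⟨⟨k, hk, rfl⟩, hv⟩, hq⟩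
    simp only [zero_add] at hq hv
    have : i = k := by exact_mod_cast hq.symm
    subst this
    exact ⟨hk, by simpa using hv⟩
  · rintro ⟨hi, hv⟩
    exact ⟨((i : Int), gs[i]), ⟨⟨i, hi, by simp⟩, by simpa using hv⟩, rfl⟩

theorem pvPos_nodup (gs : List String) (v : String) :
    ((pvPos gs).getD v []).Nodup := by
  rw [pvPos_getD]
  have h : (((PySem.List.enumerate gs 0).filter (fun q => q.2 == v))).Pairwise (fun p q => p.1 < q.1) :=
    (PySem.List.pairwise_lt_enumerate gs 0).filter _
  have h2 := List.pairwise_map.mpr (h.imp (fun hlt => hlt))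
  exact h2.imp (fun hlt => ne_of_lt hlt)

theorem pvPos_nonneg (gs : List String) (v : String) :
    ∀ j ∈ (pvPos gs).getD v [], 0 ≤ j := by
  rw [pvPos_getD]
  intro j hj
  rcases List.mem_map.mp hj with ⟨q, hq, rfl⟩
  rcases (PySem.List.mem_enumerate_iff _ _ _).mp (List.mem_filter.mp hq).1 with ⟨k, hk, rfl⟩
  simp

-- one pass over a nodup list of nonnegative positions, modifying each once
theorem pvModFold {C : Type} (f : C → C) (ps : List Int) (hnd : ps.Nodup)
    (h0 : ∀ j ∈ ps, 0 ≤ j) (o : List C) (i : Nat) :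
    (ps.foldl (fun o j => o.modify j.toNat f) o)[i]?
      = if (i : Int) ∈ ps then o[i]?.map f else o[i]? := by
  induction ps generalizing o with
  | nil => simp
  | cons j ps ih =>
    have hj0 : 0 ≤ j := h0 j (by simp)
    have hmod : (o.modify j.toNat f)[i]?
        = if j = (i : Int) then o[i]?.map f else o[i]? := by
      rw [List.getElem?_modify]
      by_cases hji : j.toNat = i
      · have : j = (i : Int) := by omega
        simp [this, Option.map]
      · have : j ≠ (i : Int) := by omega
        cases h : o[i]? <;> simp [hji, this]
    rw [List.foldl_cons, ih hnd.of_cons (fun x hx => h0 x (by simp [hx])), hmod]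
    by_cases hji : j = (i : Int)
    · have hnotin : (i : Int) ∉ ps := hji ▸ (List.nodup_cons.mp hnd).1
      simp [hji, hnotin]
    · by_cases hm : (i : Int) ∈ ps <;> simp [hm, hji, Ne.symm hji]

-- cell i after B's loop over one dict's values
theorem pvB_inner (gs : List String) (i : Nat) (hi : i < gs.length)
    (d : List (String × String)) (vals : List String) (o : List (List (List (String × String)))) :
    (vals.foldl (fun o v =>
        ((pvPos gs).getD v []).foldl (fun o j => o.modify j.toNat (· ++ [d])) o) o)[i]?
      = o[i]?.map (· ++ List.replicate ((vals.filter (fun v => v == gs[i])).length) d) := by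
  induction vals generalizing o with
  | nil => cases h : o[i]? <;> simp [h]
  | cons v vs ih =>
    simp only [List.foldl_cons, List.filter_cons]
    rw [ih, pvModFold _ _ (pvPos_nodup gs v) (pvPos_nonneg gs v)]
    by_cases hv : v = gs[i]
    · have : (i : Int) ∈ (pvPos gs).getD v [] := (pvPos_mem gs v i).mpr ⟨hi, hv.symm⟩
      have hb : (gs[i] == gs[i]) = true := by simp
      subst hv
      simp only [this, if_pos, hb, List.length_cons, Option.map_map]
      cases h : o[i]? <;> simp [List.replicate_succ, Function.comp_def]
    · have : ¬ (i : Int) ∈ (pvPos gs).getD v [] := by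
        rw [pvPos_mem]; rintro ⟨h1, h2⟩; exact hv h2.symm
      have hb : (v == gs[i]) = false := by simpa using hv
      simp [this, hb]

-- cell i after B's loop over all dicts
theorem pvB_outer (gs : List String) (i : Nat) (hi : i < gs.length)
    (ig : List (List (String × String))) (o : List (List (List (String × String)))) :
    (ig.foldl (fun o d =>
        (PySem.Dict.ofList d).values.foldl (fun o v =>
          ((pvPos gs).getD v []).foldl (fun o j => o.modify j.toNat (· ++ [d])) o) o) o)[i]?
      = o[i]?.map (· ++ pvCell gs[i] ig) := by
  induction ig generalizing o with
  | nil => cases h : o[i]? <;> simp [h, pvCell]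
  | cons d ds ih =>
    simp only [List.foldl_cons]
    rw [ih, pvB_inner gs i hi]
    cases h : o[i]? <;> simp [pvCell, List.append_assoc]

-- every step of B's loops preserves the length of out
theorem pvFoldl_length {C β : Type} (step : List C → β → List C)
    (h : ∀ o b, (step o b).length = o.length) (l : List β) (o : List C) :
    (l.foldl step o).length = o.length := by
  induction l generalizing o with
  | nil => rfl
  | cons b bs ih => rw [List.foldl_cons, ih, h]

theorem pvB_eq_map (gs : List String) (ig : List (List (String × String))) :
    group_build_alt gs ig = gs.map (fun g => pvCell g ig) := by
  show (ig.foldl (fun out d =>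
      (PySem.Dict.ofList d).values.foldl (fun out v =>
        ((pvPos gs).getD v []).foldl (fun out i => out.modify i.toNat (· ++ [d])) out) out)
      (gs.map (fun _ => []))) = gs.map (fun g => pvCell g ig)
  apply List.ext_getElem?
  intro i
  by_cases hi : i < gs.length
  · rw [pvB_outer gs i hi]
    simp [hi]
  · have hlen : (ig.foldl (fun out d =>
        (PySem.Dict.ofList d).values.foldl (fun out v =>
          ((pvPos gs).getD v []).foldl (fun out i => out.modify i.toNat (· ++ [d])) out) out)
        (gs.map (fun _ => []))).length = gs.length := by
      rw [pvFoldl_length _ (fun o d => pvFoldl_length _ (fun o v =>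
        pvFoldl_length _ (fun o j => List.length_modify _ _ _) _ o) _ o) ig]
      simp
    rw [List.getElem?_eq_none (by omega), List.getElem?_eq_none (by simp; omega)]

-- ===== VERDICT (by name: the statement is the Claim_ definition above) =====
theorem group_build_spec : Claim_equal_group_build := by
  intro gs ig _
  show group_build gs ig = group_build_alt gs ig
  rw [pvB_eq_map]
  simp only [group_build, pvA_outer, List.nil_append]
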